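-- pv_equiv track=rewrite | github.com/CapitanGrant/leetcode_tasks | tasks.py | transformArray
-- ===== SOURCE A (Python) =====
-- from typing import List, Optional, NamedTuple
--
-- def transformArray(nums: List[int]) -> List[int]:
--     res = []
--     for i in nums:
--         if i % 2 == 0:
--             res.append(0)
--         else:
--             res.append(1)
--     res.sort()
--     return res
-- ===== SOURCE B (Python) =====
-- def transformArray(nums):
--     odd = 0
--     for i in nums:
--         if i % 2 != 0:
--             odd += 1
--     return [0] * (len(nums) - odd) + [1] * odd
-- ===== Notes on version B (the rewrite author's own statement) =====
-- stated objective: alternative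
-- what changed: Replaces map-to-parity followed by a comparison sort with a single counting pass that emits the zeros block then the ones block (counting sort for two values); a timing run did not confirm a 1.5x speed-up, so no speed is claimed.
import Mathlib
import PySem

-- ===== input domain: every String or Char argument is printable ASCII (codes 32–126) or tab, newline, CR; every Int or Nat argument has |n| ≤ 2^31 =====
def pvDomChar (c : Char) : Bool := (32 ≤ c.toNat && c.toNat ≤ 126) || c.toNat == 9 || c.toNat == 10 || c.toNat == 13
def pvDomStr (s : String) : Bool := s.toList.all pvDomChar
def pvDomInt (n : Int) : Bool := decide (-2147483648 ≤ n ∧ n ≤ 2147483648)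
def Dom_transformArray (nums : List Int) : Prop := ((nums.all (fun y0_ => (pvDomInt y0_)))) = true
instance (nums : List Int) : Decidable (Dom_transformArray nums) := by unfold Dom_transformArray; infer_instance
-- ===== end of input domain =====

-- B replaces the parity map + comparison sort with one counting pass: zeros block then ones block.

-- ===== PORT A =====
def transformArray (nums : List Int) : List Int :=
  let res := nums.foldl (fun res i => if PySem.Int.mod i 2 = 0 then res ++ [0] else res ++ [1]) []
  PySem.List.sorted res (fun x => x) false

-- ===== PORT B =====
def transformArray_alt (nums : List Int) : List Int :=
  let odd := nums.foldl (fun odd i => if PySem.Int.mod i 2 ≠ 0 then odd + 1 else odd) (0 : Nat)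
  List.replicate (nums.length - odd) 0 ++ List.replicate odd 1

-- ===== PRECONDITION & SPEC =====
def Spec_transformArray (nums : List Int) (out : List Int) : Prop := out = transformArray_alt nums
instance (nums : List Int) (out : List Int) : Decidable (Spec_transformArray nums out) := by unfold Spec_transformArray; infer_instance

-- ===== CLAIM (what is proved, stated in full; the proofs are below) =====
def Claim_equal_transformArray : Prop := ∀ (nums : List Int), Dom_transformArray nums → Spec_transformArray nums (transformArray nums)

-- ===== LEMMAS AND PROOFS =====

-- PySem.Int.mod with divisor 2 is Lean's emod.
theorem pv_mod_two (i : Int) : PySem.Int.mod i 2 = i % 2 := by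
  simp [PySem.Int.mod, Int.fmod_eq_emod]

-- A's loop builds the parity map.
theorem pv_foldl_map (nums : List Int) (acc : List Int) :
    nums.foldl (fun res i => if PySem.Int.mod i 2 = 0 then res ++ [0] else res ++ [1]) acc
      = acc ++ nums.map (fun i => if PySem.Int.mod i 2 = 0 then 0 else 1) := by
  induction nums generalizing acc with
  | nil => simp
  | cons x xs ih =>
      simp only [List.foldl_cons, List.map_cons]
      by_cases h : PySem.Int.mod x 2 = 0
      · rw [if_pos h, if_pos h, ih, List.append_assoc]; rfl
      · rw [if_neg h, if_neg h, ih, List.append_assoc]; rfl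

-- B's loop counts the odd elements.
theorem pv_foldl_count (nums : List Int) (acc : Nat) :
    nums.foldl (fun odd i => if PySem.Int.mod i 2 ≠ 0 then odd + 1 else odd) acc
      = acc + nums.countP (fun i => decide (PySem.Int.mod i 2 ≠ 0)) := by
  induction nums generalizing acc with
  | nil => simp
  | cons x xs ih =>
      simp only [List.foldl_cons, List.countP_cons]
      by_cases h : PySem.Int.mod x 2 ≠ 0
      · rw [if_pos h, ih, decide_eq_true h]
        simp; omega
      · rw [if_neg h, ih, decide_eq_false h]
        simp

-- zeros-then-ones is a permutation of any 0/1 list.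
theorem pv_perm (ys : List Int) (h : ∀ y ∈ ys, y = 0 ∨ y = 1) :
    (List.replicate (ys.countP (fun y => decide (y = 0))) (0 : Int) ++
      List.replicate (ys.countP (fun y => decide (y = 1))) 1).Perm ys := by
  induction ys with
  | nil => simp
  | cons x xs ih =>
      have hx := h x (List.mem_cons_self)
      have ih' := ih (fun y hy => h y (List.mem_cons_of_mem _ hy))
      rcases hx with hx | hx <;> subst hx
      · simp only [List.countP_cons]
        norm_num
        simpa [List.replicate_succ] using (ih'.cons (0 : Int))
      · simp only [List.countP_cons]
        norm_num
        rw [List.replicate_succ]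
        exact List.perm_middle.trans (ih'.cons (1 : Int))

theorem pv_sorted_01 (ys : List Int) (h : ∀ y ∈ ys, y = 0 ∨ y = 1) :
    PySem.List.sorted ys (fun x => x) false
      = List.replicate (ys.countP (fun y => decide (y = 0))) 0 ++
        List.replicate (ys.countP (fun y => decide (y = 1))) 1 := by
  refine PySem.List.sorted_id_eq_of_perm_of_pairwise _ _ (pv_perm ys h) ?_
  rw [List.pairwise_append]
  refine ⟨?_, ?_, ?_⟩
  · exact (List.pairwise_replicate).2 (Or.inr le_rfl)
  · exact (List.pairwise_replicate).2 (Or.inr le_rfl)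
  · intro a ha b hb
    rw [List.eq_of_mem_replicate ha, List.eq_of_mem_replicate hb]
    norm_num

-- evens + odds = length.
theorem pv_split (nums : List Int) :
    nums.countP (fun i => decide (PySem.Int.mod i 2 = 0))
      + nums.countP (fun i => decide (PySem.Int.mod i 2 ≠ 0)) = nums.length := by
  induction nums with
  | nil => simp
  | cons x xs ih =>
      simp only [List.countP_cons, List.length_cons]
      by_cases h : PySem.Int.mod x 2 = 0
      · rw [decide_eq_true h, decide_eq_false (not_not_intro h),
          if_pos rfl, if_neg (by simp)]
        omega
      · rw [decide_eq_false h, decide_eq_true h,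
          if_neg (by simp), if_pos rfl]
        omega

-- ===== VERDICT (by name: the statement is the Claim_ definition above) =====
theorem transformArray_spec : Claim_equal_transformArray := by
  intro nums _
  unfold Spec_transformArray transformArray transformArray_alt
  rw [pv_foldl_map, pv_foldl_count, List.nil_append, Nat.zero_add]
  set f : Int → Int := fun i => if PySem.Int.mod i 2 = 0 then 0 else 1 with hf
  have h01 : ∀ y ∈ nums.map f, y = 0 ∨ y = 1 := by
    intro y hy
    rcases List.mem_map.1 hy with ⟨i, _, rfl⟩
    by_cases h : PySem.Int.mod i 2 = 0
    · exact Or.inl (by rw [hf]; exact if_pos h)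
    · exact Or.inr (by rw [hf]; exact if_neg h)
  have hzero : (nums.map f).countP (fun y => decide (y = 0))
      = nums.countP (fun i => decide (PySem.Int.mod i 2 = 0)) := by
    rw [List.countP_map]
    apply List.countP_congr
    intro i _
    by_cases h : PySem.Int.mod i 2 = 0
    · simp [hf]
    · simp [hf, pv_mod_two] at *
  have hone : (nums.map f).countP (fun y => decide (y = 1))
      = nums.countP (fun i => decide (PySem.Int.mod i 2 ≠ 0)) := by
    rw [List.countP_map]
    apply List.countP_congr
    intro i _
    by_cases h : PySem.Int.mod i 2 = 0
    · simp [hf]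
    · simp [hf, pv_mod_two] at *
  have hsplit := pv_split nums
  rw [pv_sorted_01 _ h01, hzero, hone]
  congr 1
  congr 1
  omega
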